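-- pv_equiv track=rewrite | github.com/homebrew9/leetcode_solutions | algorithms/hard/distance_to_a_cycle_in_undirected_graph.py | distanceToCycle
-- ===== SOURCE A (Python) =====
-- from typing import List
-- from collections import deque
--
-- def distanceToCycle(n: int, edges: List[List[int]]) -> List[int]:
--     # 'is_in_cycle' is initially True for all nodes
--     is_in_cycle = [True] * n
--     visited = [False] * n
--     degree = [0] * n
--     distances = [0] * n
--     adjacency_list = [[] for _ in range(n)]
--
--     # Build the adjacency list and calculate node degrees
--     for edge in edges:
--         adjacency_list[edge[0]].append(edge[1])
--         adjacency_list[edge[1]].append(edge[0])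
--         degree[edge[0]] += 1
--         degree[edge[1]] += 1
--
--     node_queue = deque()
--
--     # Start by adding all leaf nodes (degree 1) to the queue
--     for i in range(n):
--         if degree[i] == 1:
--             node_queue.append(i)
--
--     # Perform BFS to remove nodes with degree 1, progressively reducing the graph
--     while node_queue:
--         current_node = node_queue.popleft()
--         # Mark the node as not in the cycle
--         is_in_cycle[current_node] = False
--
--         # Update the degree of neighbors and add them to the queue if their degree becomes 1
--         for neighbor in adjacency_list[current_node]:
--             degree[neighbor] -= 1
--             if degree[neighbor] == 1:
--                 node_queue.append(neighbor)
--
--     # Add all cycle nodes to the queue and mark them as visited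
--     for current_node in range(n):
--         if is_in_cycle[current_node]:
--             node_queue.append(current_node)
--             visited[current_node] = True
--
--     # BFS to calculate distances from cycle nodes
--     current_distance = 0
--     while node_queue:
--         # Track number of nodes to process at this distance level
--         queue_size = len(node_queue)
--         for _ in range(queue_size):
--             current_node = node_queue.popleft()
--             # Set the distance for the current node
--             distances[current_node] = current_distance
--
--             # Add unvisited neighbors to the queue
--             for neighbor in adjacency_list[current_node]:
--                 if visited[neighbor]:
--                     continue
--                 node_queue.append(neighbor)
--                 visited[neighbor] = True
--         # Increment distance after processing all nodes at the current level
--         current_distance += 1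
--
--     return distances
-- ===== SOURCE B (Python) =====
-- from typing import List
-- from collections import deque
--
-- def distanceToCycle(n: int, edges: List[List[int]]) -> List[int]:
--     neighbors = [[] for _ in range(n)]
--     for edge in edges:
--         for u, v in ((edge[0], edge[1]), (edge[1], edge[0])):
--             neighbors[u].append(v)
--
--     # Find the cycle (the 2-core) by synchronous rounds of bulk filtering:
--     # in every round drop, all at once, each node that is not isolated yet
--     # has fewer than two surviving neighbours; stop at the fixpoint.
--     core = [True] * n
--     for _ in range(n):
--         refined = [core[v] and (not neighbors[v] or sum(core[w] for w in neighbors[v]) >= 2)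
--                    for v in range(n)]
--         if refined == core:
--             break
--         core = refined
--
--     # Multi-source BFS from the core, carrying the distance in the queue
--     distances = [0] * n
--     seen = core[:]
--     queue = deque((v, 0) for v in range(n) if core[v])
--     while queue:
--         u, d = queue.popleft()
--         distances[u] = d
--         for w in neighbors[u]:
--             if not seen[w]:
--                 seen[w] = True
--                 queue.append((w, d + 1))
--     return distances
-- ===== Notes on version B (the rewrite author's own statement) =====
-- stated objective: alternative
-- what changed: B finds the cycle (the 2-core) by synchronous rounds of bulk filtering - each round recomputes, for all nodes at once, whether a node is isolated or still has at least two surviving neighbours, until a fixpoint - instead of A's sequential queue-driven leaf peeling with mutable degree counters; the distance phase is a flat BFS whose queue carries (node, distance) pairs instead of A's level-counting BFS with an inner queue_size loop and a separate visited-marking pass.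
import Mathlib
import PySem

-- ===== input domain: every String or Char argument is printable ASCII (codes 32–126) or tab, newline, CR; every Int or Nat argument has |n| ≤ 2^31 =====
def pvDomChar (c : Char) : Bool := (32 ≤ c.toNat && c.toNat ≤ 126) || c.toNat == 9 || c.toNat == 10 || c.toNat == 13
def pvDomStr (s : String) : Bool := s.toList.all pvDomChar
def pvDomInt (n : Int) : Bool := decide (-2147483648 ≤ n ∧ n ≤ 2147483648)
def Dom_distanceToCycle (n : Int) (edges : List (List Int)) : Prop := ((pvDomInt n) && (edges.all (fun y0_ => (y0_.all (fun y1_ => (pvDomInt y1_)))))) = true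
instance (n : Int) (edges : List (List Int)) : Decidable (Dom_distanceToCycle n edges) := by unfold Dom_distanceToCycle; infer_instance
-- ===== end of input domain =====

-- B replaces A's sequential queue-driven leaf peeling (mutable degree counters, deque) by a
-- synchronous fixpoint iteration that in bulk rounds keeps exactly the nodes that are isolated
-- or still have at least two surviving neighbours, and replaces A's level-counting BFS by a
-- flat BFS whose queue carries (node, distance) pairs (objective: alternative).

-- ===== PORT A =====
-- 'for edge in edges': two adjacency appends and two degree increments per edge
def pvBuildA (N : Nat) (edges : List (List Int)) : List (List Int) × List Int :=
  edges.foldl (fun (s : List (List Int) × List Int) e =>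
      let u := PySem.List.pyGetD e 0 0
      let v := PySem.List.pyGetD e 1 0
      let adj1 := PySem.List.pySetD s.1 u (PySem.List.pyGetD s.1 u [] ++ [v])
      let adj2 := PySem.List.pySetD adj1 v (PySem.List.pyGetD adj1 v [] ++ [u])
      let deg1 := PySem.List.pySetD s.2 u (PySem.List.pyGetD s.2 u 0 + 1)
      let deg2 := PySem.List.pySetD deg1 v (PySem.List.pyGetD deg1 v 0 + 1)
      (adj2, deg2))
    (List.replicate N [], List.replicate N 0)

-- 'for i in range(n): if degree[i] == 1: node_queue.append(i)'
def pvLeavesA (n : Int) (deg : List Int) : List Int :=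
  (PySem.List.pyRange 0 n 1).foldl
    (fun q i => if PySem.List.pyGetD deg i 0 = 1 then q ++ [i] else q) []

-- inner loop 'for neighbor in adjacency_list[current_node]' of A's leaf-peeling phase
def pvPeelStepA (s : List Int × List Int) (v : Int) : List Int × List Int :=
  let d := PySem.List.pyGetD s.1 v 0 - 1
  (PySem.List.pySetD s.1 v d, if d = 1 then s.2 ++ [v] else s.2)

-- 'while node_queue' of A's leaf-peeling phase; fuel n bounds the pops (each node enqueued once)
def pvPeelA (adj : List (List Int)) : Nat → List Int → List Int → List Bool → List Bool
  | 0, _, _, cyc => cyc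
  | _ + 1, [], _, cyc => cyc
  | f + 1, u :: rest, deg, cyc =>
    let cyc' := PySem.List.pySetD cyc u false
    let s := (PySem.List.pyGetD adj u []).foldl pvPeelStepA (deg, rest)
    pvPeelA adj f s.2 s.1 cyc'

-- 'if is_in_cycle[i]: queue.append(i); visited[i] = True' seeding loop of A
def pvSeedStep (cyc : List Bool) (s : List Int × List Bool) (i : Int) : List Int × List Bool :=
  if PySem.List.pyGetD cyc i false then (s.1 ++ [i], PySem.List.pySetD s.2 i true) else s

def pvSeedA (n : Int) (N : Nat) (cyc : List Bool) : List Int × List Bool :=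
  (PySem.List.pyRange 0 n 1).foldl (pvSeedStep cyc) ([], List.replicate N false)

-- inner loop 'for neighbor in adjacency_list[current_node]' of A's distance BFS
def pvBfsStepA (s : List Bool × List Int) (v : Int) : List Bool × List Int :=
  if PySem.List.pyGetD s.1 v false then s
  else (PySem.List.pySetD s.1 v true, s.2 ++ [v])

-- A's level BFS: k = pops left in the current level ('for _ in range(queue_size)'),
-- d = current_distance of that level; at k = 0 the outer 'while' recomputes both
def pvBfsA (adj : List (List Int)) : Nat → Nat → Int → List Int → List Bool → List Int → List Int
  | 0, _, _, _, _, dist => dist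
  | _ + 1, _, _, [], _, dist => dist
  | f + 1, k, d, u :: rest, vis, dist =>
    let kd := if k = 0 then ((u :: rest).length, d + 1) else (k, d)
    let dist' := PySem.List.pySetD dist u kd.2
    let s := (PySem.List.pyGetD adj u []).foldl pvBfsStepA (vis, rest)
    pvBfsA adj f (kd.1 - 1) kd.2 s.2 s.1 dist'

def distanceToCycle (n : Int) (edges : List (List Int)) : List Int :=
  let N := n.toNat
  let built := pvBuildA N edges
  let cyc := pvPeelA built.1 N (pvLeavesA n built.2) built.2 (List.replicate N true)
  let seeded := pvSeedA n N cyc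
  pvBfsA built.1 N 0 (-1) seeded.1 seeded.2 (List.replicate N 0)

-- ===== PORT B =====
-- 'for edge in edges: for u, v in ((edge[0], edge[1]), (edge[1], edge[0])): neighbors[u].append(v)'
def pvBuildB (N : Nat) (edges : List (List Int)) : List (List Int) :=
  edges.foldl (fun adj e =>
      [(PySem.List.pyGetD e 0 0, PySem.List.pyGetD e 1 0),
       (PySem.List.pyGetD e 1 0, PySem.List.pyGetD e 0 0)].foldl
        (fun adj (p : Int × Int) =>
          PySem.List.pySetD adj p.1 (PySem.List.pyGetD adj p.1 [] ++ [p.2])) adj)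
    (List.replicate N [])

-- 'sum(core[w] for w in neighbors[v])' (a 0/1-sum is a count of surviving neighbours)
def pvCnt (c : List Bool) (ws : List Int) : Nat :=
  (ws.filter (fun w => PySem.List.pyGetD c w false)).length

-- one bulk round: '[core[v] and (not neighbors[v] or sum(...) >= 2) for v in range(n)]'
def pvRound (adj : List (List Int)) (n : Int) (c : List Bool) : List Bool :=
  (PySem.List.pyRange 0 n 1).map (fun v =>
    PySem.List.pyGetD c v false &&
      (decide (PySem.List.pyGetD adj v [] = []) ||
       decide (2 ≤ pvCnt c (PySem.List.pyGetD adj v []))))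

-- 'for _ in range(n): refined = ...; if refined == core: break; core = refined'
def pvCoreIter (adj : List (List Int)) (n : Int) : Nat → List Bool → List Bool
  | 0, c => c
  | f + 1, c =>
    let c' := pvRound adj n c
    if c' = c then c else pvCoreIter adj n f c'

-- inner loop of B's BFS: enqueue unseen neighbours tagged with distance d + 1
def pvBfsStepB (d : Int) (s : List Bool × List (Int × Int)) (v : Int) :
    List Bool × List (Int × Int) :=
  if PySem.List.pyGetD s.1 v false then s
  else (PySem.List.pySetD s.1 v true, s.2 ++ [(v, d + 1)])

-- B's flat BFS over a queue of (node, distance) pairs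
def pvBfsB (adj : List (List Int)) : Nat → List (Int × Int) → List Bool → List Int → List Int
  | 0, _, _, dist => dist
  | _ + 1, [], _, dist => dist
  | f + 1, (u, d) :: rest, seen, dist =>
    let dist' := PySem.List.pySetD dist u d
    let s := (PySem.List.pyGetD adj u []).foldl (pvBfsStepB d) (seen, rest)
    pvBfsB adj f s.2 s.1 dist'

def distanceToCycle_alt (n : Int) (edges : List (List Int)) : List Int :=
  let N := n.toNat
  let adj := pvBuildB N edges
  let core := pvCoreIter adj n N (List.replicate N true)
  let q := ((PySem.List.pyRange 0 n 1).filter (fun i => PySem.List.pyGetD core i false)).map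
    (fun i => (i, (0 : Int)))
  pvBfsB adj N q core (List.replicate N 0)

-- ===== PRECONDITION & SPEC =====
-- Pre_: exactly the inputs where Python A returns normally: every edge has at least two entries,
-- both endpoints are Python-valid indices into a length-n list (negative ones index from the end),
-- and n is nonnegative unless there are no edges at all (A raises IndexError otherwise).
def Pre_distanceToCycle (n : Int) (edges : List (List Int)) : Prop :=
  (0 ≤ n ∨ edges = []) ∧
  edges.all (fun e =>
    match e with
    | u :: v :: _ => decide (-n ≤ u) && decide (u < n) && decide (-n ≤ v) && decide (v < n)
    | _ => false) = true
instance (n : Int) (edges : List (List Int)) : Decidable (Pre_distanceToCycle n edges) := by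
  unfold Pre_distanceToCycle; infer_instance

def pvWitness_distanceToCycle : Int × List (List Int) := (4, [[0, 1], [1, 2], [2, 0], [2, 3]])

def Spec_distanceToCycle (n : Int) (edges : List (List Int)) (out : List Int) : Prop := out = distanceToCycle_alt n edges
instance (n : Int) (edges : List (List Int)) (out : List Int) : Decidable (Spec_distanceToCycle n edges out) := by unfold Spec_distanceToCycle; infer_instance

-- ===== CLAIM (what is proved, stated in full; the proofs are below) =====
def Claim_equal_distanceToCycle : Prop := ∀ (n : Int) (edges : List (List Int)), Dom_distanceToCycle n edges → Pre_distanceToCycle n edges → Spec_distanceToCycle n edges (distanceToCycle n edges)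

-- ===== LEMMAS AND PROOFS =====

-- analysis-only definitions (used by the proofs, not by the ports)
def pvValid (N : Nat) (w : Int) : Prop := -(N:Int) ≤ w ∧ w < N
def pvMult (N j : Nat) (ws : List Int) : Nat :=
  (ws.filter (fun w => PySem.List.pyIdx? N w == some j)).length
def pvStable (adj : List (List Int)) (c : List Bool) : Prop :=
  ∀ j : Nat, j < c.length → c.getD j false = true →
    adj.getD j [] = [] ∨ 2 ≤ pvCnt c (adj.getD j [])
def pvLe (S c : List Bool) : Prop := ∀ j : Nat, S.getD j false = true → c.getD j false = true
def pvCanonL (N : Nat) (Q : List Int) : List Nat := Q.filterMap (PySem.List.pyIdx? N)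
def pvQInv (N : Nat) (c : List Bool) (Q : List Int) : Prop :=
  (∀ q ∈ Q, pvValid N q) ∧ (pvCanonL N Q).Nodup ∧
  (∀ j ∈ pvCanonL N Q, c.getD j false = true)
def pvAdjOK (N : Nat) (adj : List (List Int)) : Prop :=
  adj.length = N ∧ (∀ j : Nat, j < N → ∀ w ∈ adj.getD j [], pvValid N w) ∧
  (∀ i j : Nat, i < N → j < N → pvMult N i (adj.getD j []) = pvMult N j (adj.getD i []))

-- index/get/set bridges between Python indexing and canonical Nat indexing

theorem pvIdx_some (N : Nat) (w : Int) (h1 : -(N:Int) ≤ w) (h2 : w < N) :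
    ∃ j : Nat, PySem.List.pyIdx? N w = some j ∧ j < N := by
  unfold PySem.List.pyIdx?
  by_cases h0 : 0 ≤ w
  · refine ⟨w.toNat, by simp [h0, h2], by omega⟩
  · refine ⟨N - (-w).toNat, by simp [h0, h1], by omega⟩

theorem pvGetD_canon {α : Type} (xs : List α) (w : Int) (d : α) (j : Nat)
    (h : PySem.List.pyIdx? xs.length w = some j) :
    PySem.List.pyGetD xs w d = xs.getD j d := by
  simp [PySem.List.pyGetD, PySem.List.pyGet?, h, List.getD_eq_getElem?_getD]

theorem pvGetD_none {α : Type} (xs : List α) (w : Int) (d : α)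
    (h : PySem.List.pyIdx? xs.length w = none) :
    PySem.List.pyGetD xs w d = d := by
  simp [PySem.List.pyGetD, PySem.List.pyGet?, h]

theorem pvSetD_canon {α : Type} (xs : List α) (w : Int) (x : α) (j : Nat)
    (h : PySem.List.pyIdx? xs.length w = some j) :
    PySem.List.pySetD xs w x = xs.set j x := by
  simp [PySem.List.pySetD, PySem.List.pySet?, h]

theorem pvGetD_set {α : Type} (xs : List α) (i j : Nat) (v : α) (d : α) (hi : i < xs.length) :
    (xs.set i v).getD j d = if j = i then v else xs.getD j d := by
  rw [List.getD_eq_getElem?_getD, List.getElem?_set, List.getD_eq_getElem?_getD]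
  by_cases h : i = j
  · subst h; simp [hi]
  · simp [h, Ne.symm h]


-- counting lemmas
theorem pvCnt_cons (c : List Bool) (w : Int) (ws : List Int) :
    pvCnt c (w :: ws) = (if PySem.List.pyGetD c w false then 1 else 0) + pvCnt c ws := by
  simp only [pvCnt, List.filter_cons]
  split <;> simp [Nat.add_comm]

theorem pvMult_cons (N j : Nat) (w : Int) (ws : List Int) :
    pvMult N j (w :: ws) = (if PySem.List.pyIdx? N w = some j then 1 else 0) + pvMult N j ws := by
  simp only [pvMult, List.filter_cons, beq_iff_eq]
  split <;> simp_all [Nat.add_comm]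

theorem pvEntry_le (S c : List Bool) (hlen : S.length = c.length) (hle : pvLe S c) (w : Int)
    (h : PySem.List.pyGetD S w false = true) : PySem.List.pyGetD c w false = true := by
  cases hi : PySem.List.pyIdx? c.length w with
  | none => rw [pvGetD_none S w false (by rw [hlen]; exact hi)] at h; exact absurd h (by simp)
  | some j =>
    rw [pvGetD_canon S w false j (by rw [hlen]; exact hi)] at h
    rw [pvGetD_canon c w false j hi]
    exact hle j h

theorem pvCnt_le (S c : List Bool) (hlen : S.length = c.length) (hle : pvLe S c)
    (ws : List Int) : pvCnt S ws ≤ pvCnt c ws := by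
  induction ws with
  | nil => simp [pvCnt]
  | cons w ws ih =>
    rw [pvCnt_cons, pvCnt_cons]
    by_cases h : PySem.List.pyGetD S w false
    · rw [pvEntry_le S c hlen hle w h]; simp [h]; omega
    · simp [h]; split <;> omega

theorem pvCnt_replicate (N : Nat) (ws : List Int) (h : ∀ w ∈ ws, pvValid N w) :
    pvCnt (List.replicate N true) ws = ws.length := by
  induction ws with
  | nil => simp [pvCnt]
  | cons w ws ih =>
    obtain ⟨h1, h2⟩ := h w (by simp)
    have : ∃ j : Nat, PySem.List.pyIdx? N w = some j ∧ j < N := by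
      unfold PySem.List.pyIdx?
      by_cases h0 : 0 ≤ w
      · exact ⟨w.toNat, by simp [h0, h2], by omega⟩
      · exact ⟨N - (-w).toNat, by simp [h0, h1], by omega⟩
    obtain ⟨j, hj, hjN⟩ := this
    rw [pvCnt_cons, pvGetD_canon _ w false j (by simpa using hj)]
    rw [List.getD_eq_getElem?_getD]
    simp [hjN, ih (fun x hx => h x (by simp [hx])), Nat.add_comm]

theorem pvCnt_set_false (c : List Bool) (u : Nat) (hu : u < c.length)
    (hc : c.getD u false = true) (ws : List Int) :
    pvCnt (c.set u false) ws + pvMult c.length u ws = pvCnt c ws := by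
  rw [List.getD_eq_getElem?_getD] at hc
  induction ws with
  | nil => simp [pvCnt, pvMult]
  | cons w ws ih =>
    rw [pvCnt_cons, pvCnt_cons, pvMult_cons]
    cases hi : PySem.List.pyIdx? c.length w with
    | none =>
      rw [pvGetD_none c w false hi, pvGetD_none _ w false (by simpa using hi)]
      simp [hi]; omega
    | some j =>
      rw [pvGetD_canon c w false j hi, pvGetD_canon _ w false j (by simpa using hi),
        pvGetD_set c u j false false hu]
      by_cases hju : j = u
      · subst hju; simp [hc]; omega
      · simp [hi, hju]; split <;> omega

theorem pvCT_zero (cc : List Bool) (h : cc.count true = 0) (j : Nat) : cc.getD j false = false := by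
  have hmem : true ∉ cc := List.count_eq_zero.mp h
  by_cases hg : cc.getD j false = true
  · exfalso
    rw [List.getD_eq_getElem?_getD] at hg
    cases hc : (cc[j]?) with
    | none => rw [hc] at hg; simp at hg
    | some b =>
      rw [hc] at hg; simp at hg
      exact hmem (hg ▸ List.mem_of_getElem? hc)
  · simpa using hg

theorem pvCT_set_false (cc : List Bool) : ∀ (j : Nat), j < cc.length → cc.getD j false = true →
    (cc.set j false).count true + 1 = cc.count true := by
  induction cc with
  | nil => intro j hj; simp at hj
  | cons x xs ih =>
    intro j hj hc
    cases j with
    | zero =>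
      rw [List.getD_cons_zero] at hc; subst hc
      simp [List.count_cons]
    | succ k =>
      rw [List.getD_cons_succ] at hc
      have := ih k (by simpa using hj) hc
      simp only [List.set_cons_succ, List.count_cons]
      omega

theorem pvCT_mono (a : List Bool) : ∀ (b : List Bool), a.length = b.length →
    (∀ j : Nat, a.getD j false = true → b.getD j false = true) →
    a.count true ≤ b.count true := by
  induction a with
  | nil => intro b hl _; simp
  | cons x xs ih =>
    intro b hl h
    cases b with
    | nil => simp at hl
    | cons y ys =>
      have hh := h 0
      rw [List.getD_cons_zero, List.getD_cons_zero] at hh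
      have ht := ih ys (by simpa using hl) (fun j hj => by
        have := h (j + 1); rw [List.getD_cons_succ, List.getD_cons_succ] at this; exact this hj)
      cases x <;> cases y <;> simp_all [List.count_cons] <;> omega

theorem pvCT_lt (a : List Bool) : ∀ (b : List Bool), a.length = b.length →
    (∀ j : Nat, a.getD j false = true → b.getD j false = true) →
    a ≠ b → a.count true < b.count true := by
  induction a with
  | nil =>
    intro b hl _ hne
    cases b with
    | nil => exact absurd rfl hne
    | cons y ys => simp at hl
  | cons x xs ih =>
    intro b hl h hne
    cases b with
    | nil => simp at hl
    | cons y ys =>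
      have hh := h 0
      rw [List.getD_cons_zero, List.getD_cons_zero] at hh
      have htl : xs.length = ys.length := by simpa using hl
      have htp : ∀ j : Nat, xs.getD j false = true → ys.getD j false = true := fun j hj => by
        have := h (j + 1); rw [List.getD_cons_succ, List.getD_cons_succ] at this; exact this hj
      by_cases hxy : x = y
      · subst hxy
        have hne' : xs ≠ ys := fun hx => hne (by rw [hx])
        have := ih ys htl htp hne'
        cases x <;> simp_all [List.count_cons]
      · have hx : x = false := by
          cases x with
          | false => rfl
          | true => exact absurd (hh rfl).symm hxy
        have hy : y = true := by
          cases y with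
          | true => rfl
          | false => subst hx; exact absurd rfl hxy
        subst hx; subst hy
        have := pvCT_mono xs ys htl htp
        simp [List.count_cons]
        omega

-- facts about the built adjacency structure
theorem pvAppendOne (N : Nat) (adj : List (List Int)) (hlen : adj.length = N)
    (u x : Int) (hu : pvValid N u) (uh : Nat) (hcu : PySem.List.pyIdx? N u = some uh)
    (huh : uh < N) :
    (PySem.List.pySetD adj u (PySem.List.pyGetD adj u [] ++ [x])).length = N ∧
    ∀ j : Nat, j < N →
      (PySem.List.pySetD adj u (PySem.List.pyGetD adj u [] ++ [x])).getD j []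
        = adj.getD j [] ++ (if j = uh then [x] else []) := by
  have hset := pvSetD_canon adj u (PySem.List.pyGetD adj u [] ++ [x]) uh (by rw [hlen]; exact hcu)
  have hget := pvGetD_canon adj u ([] : List Int) uh (by rw [hlen]; exact hcu)
  constructor
  · rw [hset]; simp [hlen]
  · intro j hj
    rw [hset, hget, pvGetD_set adj uh j _ [] (by omega)]
    by_cases h : j = uh <;> simp [h]

theorem pvGetD_e0 (u v : Int) (r : List Int) : PySem.List.pyGetD (u :: v :: r) 0 0 = u :=
  PySem.List.pyGetD_zero_cons u (v :: r) 0
theorem pvGetD_e1 (u v : Int) (r : List Int) : PySem.List.pyGetD (u :: v :: r) 1 0 = v := by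
  rw [show ((1:Int)) = ((1:Nat):Int) by norm_num, PySem.List.pyGetD_natCast]
  rfl

-- adding one undirected edge keeps pvAdjOK
theorem pvAddEdge (N : Nat) (adj : List (List Int)) (hOK : pvAdjOK N adj)
    (u v : Int) (hu : pvValid N u) (hv : pvValid N v) :
    pvAdjOK N
      (PySem.List.pySetD (PySem.List.pySetD adj u (PySem.List.pyGetD adj u [] ++ [v])) v
        (PySem.List.pyGetD (PySem.List.pySetD adj u (PySem.List.pyGetD adj u [] ++ [v])) v [] ++ [u])) := by
  obtain ⟨hlen, hval, hsym⟩ := hOK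
  obtain ⟨uh, hcu, huh⟩ := pvIdx_some N u hu.1 hu.2
  obtain ⟨vh, hcv, hvh⟩ := pvIdx_some N v hv.1 hv.2
  obtain ⟨hlen1, hget1⟩ := pvAppendOne N adj hlen u v hu uh hcu huh
  set adj1 := PySem.List.pySetD adj u (PySem.List.pyGetD adj u [] ++ [v]) with hadj1
  obtain ⟨hlen2, hget2⟩ := pvAppendOne N adj1 hlen1 v u hv vh hcv hvh
  set adj2 := PySem.List.pySetD adj1 v (PySem.List.pyGetD adj1 v [] ++ [u]) with hadj2
  have hget : ∀ j : Nat, j < N → adj2.getD j []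
      = adj.getD j [] ++ (if j = uh then [v] else []) ++ (if j = vh then [u] else []) := by
    intro j hj
    rw [hget2 j hj, hget1 j hj]
  refine ⟨hlen2, ?_, ?_⟩
  · intro j hj w hw
    rw [hget j hj] at hw
    simp only [List.mem_append] at hw
    rcases hw with (hw | hw) | hw
    · exact hval j hj w hw
    · split at hw <;> simp_all
    · split at hw <;> simp_all
  · intro i j hi hj
    rw [hget i hi, hget j hj]
    rw [List.append_assoc, List.append_assoc]
    simp only [pvMult, List.filter_append, List.length_append]
    have base := hsym i j hi hj
    simp only [pvMult] at base
    have mval : ∀ (P : Prop) (_ : Decidable P) (k : Nat) (y : Int) (yh : Nat),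
        PySem.List.pyIdx? N y = some yh →
        ((if P then [y] else []).filter (fun w => PySem.List.pyIdx? N w == some k)).length
          = if P ∧ yh = k then 1 else 0 := by
      intro P hP k y yh hcy
      by_cases h1 : P <;> by_cases h2 : yh = k <;> simp [h1, h2, hcy] <;> simp_all
    rw [mval _ _ i v vh hcv, mval _ _ i u uh hcu, mval _ _ j v vh hcv, mval _ _ j u uh hcu]
    rw [base]
    split_ifs <;> omega

theorem pvBuildB_ok (n : Int) (hn : 0 ≤ n) (edges : List (List Int))
    (hPre : edges.all (fun e =>
      match e with
      | u :: v :: _ => decide (-n ≤ u) && decide (u < n) && decide (-n ≤ v) && decide (v < n)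
      | _ => false) = true) :
    pvAdjOK n.toNat (pvBuildB n.toNat edges) := by
  have hNn : ((n.toNat : Int)) = n := Int.toNat_of_nonneg hn
  unfold pvBuildB
  have init : pvAdjOK n.toNat (List.replicate n.toNat ([] : List Int)) := by
    refine ⟨by simp, ?_, ?_⟩
    · intro j hj w hw
      rw [List.getD_replicate ([] : List Int) hj] at hw
      simp at hw
    · intro i j hi hj
      rw [List.getD_replicate ([] : List Int) hj, List.getD_replicate ([] : List Int) hi]
      simp [pvMult]
  revert init
  generalize (List.replicate n.toNat ([] : List Int)) = adj0
  induction edges generalizing adj0 with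
  | nil => intro h; simpa using h
  | cons e es ih =>
    intro h0
    rw [List.all_cons] at hPre
    obtain ⟨he, hes⟩ := by exact (Bool.and_eq_true _ _).mp hPre
    simp only [List.foldl_cons]
    apply ih hes
    match e, he with
    | u :: v :: r, he =>
      simp only [decide_eq_true_eq, Bool.and_eq_true] at he
      obtain ⟨⟨⟨h1, h2⟩, h3⟩, h4⟩ := he
      simp only [List.foldl_cons, List.foldl_nil, pvGetD_e0, pvGetD_e1]
      exact pvAddEdge n.toNat adj0 h0 u v ⟨by omega, by omega⟩ ⟨by omega, by omega⟩

-- facts about B's bulk-filtering rounds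
theorem pvRound_length (adj : List (List Int)) (n : Int) (c : List Bool) :
    (pvRound adj n c).length = n.toNat := by
  simp [pvRound, PySem.List.length_pyRange_one]

theorem pvRound_getD (adj : List (List Int)) (n : Int) (c : List Bool) (j : Nat)
    (hj : j < n.toNat) :
    (pvRound adj n c).getD j false
      = (c.getD j false &&
          (decide (adj.getD j [] = []) || decide (2 ≤ pvCnt c (adj.getD j [])))) := by
  unfold pvRound
  have hn : 0 ≤ n := by omega
  rw [← Int.toNat_of_nonneg hn]
  rw [List.getD_eq_getElem?_getD,
    PySem.List.getElem?_map_pyRange_zero _ _ _ hj, Option.getD_some]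
  simp [PySem.List.pyGetD_natCast]

theorem pvRound_le (adj : List (List Int)) (n : Int) (c : List Bool) (j : Nat)
    (h : (pvRound adj n c).getD j false = true) : c.getD j false = true := by
  by_cases hj : j < n.toNat
  · rw [pvRound_getD adj n c j hj] at h
    exact (Bool.and_eq_true _ _).mp h |>.1
  · rw [List.getD_eq_default] at h
    · exact absurd h (by simp)
    · rw [pvRound_length]; omega

theorem pvRound_fix_stable (adj : List (List Int)) (n : Int) (c : List Bool)
    (hlen : c.length = n.toNat) (hfix : pvRound adj n c = c) : pvStable adj c := by
  intro j hj hc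
  have := pvRound_getD adj n c j (by omega)
  rw [hfix, hc] at this
  have h2 := this.symm
  rw [Bool.true_and] at h2
  rcases (Bool.or_eq_true _ _).mp h2 with h | h
  · exact Or.inl (by simpa using h)
  · exact Or.inr (by simpa using h)

theorem pvRound_mono (adj : List (List Int)) (n : Int) (S c : List Bool)
    (hSlen : S.length = n.toNat) (hclen : c.length = n.toNat)
    (hSst : pvStable adj S) (hle : pvLe S c) : pvLe S (pvRound adj n c) := by
  intro j hj
  have hjN : j < n.toNat := by
    by_contra h
    rw [List.getD_eq_default] at hj
    · exact absurd hj (by simp)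
    · omega
  rw [pvRound_getD adj n c j hjN, hle j hj, Bool.true_and]
  rcases hSst j (by omega) hj with h | h
  · simp only [Bool.or_eq_true, decide_eq_true_eq]
    exact Or.inl h
  · have := pvCnt_le S c (by omega) hle (adj.getD j [])
    have h2 : 2 ≤ pvCnt c (adj.getD j []) := by omega
    simp only [Bool.or_eq_true, decide_eq_true_eq]
    exact Or.inr h2

theorem pvCoreIter_ok (adj : List (List Int)) (n : Int) :
    ∀ (f : Nat) (c : List Bool), c.length = n.toNat → c.count true ≤ f →
    (pvCoreIter adj n f c).length = n.toNat ∧ pvStable adj (pvCoreIter adj n f c) ∧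
    ∀ S : List Bool, S.length = n.toNat → pvStable adj S → pvLe S c →
      pvLe S (pvCoreIter adj n f c) := by
  intro f
  induction f with
  | zero =>
    intro c hlen hct
    refine ⟨hlen, ?_, fun S _ _ hle => hle⟩
    intro j hj hc
    simp only [pvCoreIter] at hj hc ⊢
    rw [pvCT_zero c (by omega) j] at hc
    exact absurd hc (by simp)
  | succ f ih =>
    intro c hlen hct
    show (let c' := pvRound adj n c; if c' = c then c else pvCoreIter adj n f c').length = _ ∧ _
    by_cases hfix : pvRound adj n c = c
    · simp only [pvCoreIter, hfix, if_pos]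
      exact ⟨hlen, pvRound_fix_stable adj n c hlen hfix, fun S _ _ hle => hle⟩
    · have hlt : (pvRound adj n c).count true < c.count true := by
        apply pvCT_lt _ _ (by rw [pvRound_length, hlen]) _ hfix
        intro j hj
        exact pvRound_le adj n c j hj
      have := ih (pvRound adj n c) (pvRound_length adj n c) (by omega)
      simp only [pvCoreIter, hfix, if_neg, not_false_iff]
      refine ⟨this.1, this.2.1, ?_⟩
      intro S hS hSst hle
      exact this.2.2 S hS hSst (pvRound_mono adj n S c hS hlen hSst hle)

-- invariant preservation along the inner decrement loop of A's peeling phase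
theorem pvCanonL_append_canon (N : Nat) (Q : List Int) (w : Int) (wh : Nat)
    (hw : PySem.List.pyIdx? N w = some wh) :
    pvCanonL N (Q ++ [w]) = pvCanonL N Q ++ [wh] := by
  simp [pvCanonL, List.filterMap_append, hw]

theorem pvFoldInv (N : Nat) (adj : List (List Int)) (S cyc' : List Bool) (uh : Nat)
    (hSlen : S.length = N) (hclen : cyc'.length = N)
    (hSle : pvLe S cyc') (hSst : pvStable adj S) :
    ∀ (ws : List Int) (deg Q : List Int),
    (∀ w ∈ ws, pvValid N w) →
    deg.length = N →
    (∀ j : Nat, j < N →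
      deg.getD j 0 = (pvCnt cyc' (adj.getD j []) : Int) + (pvMult N j ws : Int)) →
    (∀ j : Nat, j < N → pvMult N j ws ≤ pvMult N uh (adj.getD j [])) →
    pvQInv N cyc' Q →
    (∀ j : Nat, j < N → (j ∈ pvCanonL N Q ∨ cyc'.getD j false = false) → deg.getD j 0 ≤ 1) →
    (∀ j : Nat, j < N → cyc'.getD j false = true → j ∉ pvCanonL N Q → deg.getD j 0 ≠ 1) →
    (∀ j : Nat, j < N → cyc'.getD j false = true → j ∉ pvCanonL N Q → deg.getD j 0 ≤ 0 →
      adj.getD j [] = []) →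
    (∀ j : Nat, j < N → S.getD j false = true → j ∉ pvCanonL N Q) →
    ((ws.foldl pvPeelStepA (deg, Q)).1.length = N ∧
     (∀ j : Nat, j < N → (ws.foldl pvPeelStepA (deg, Q)).1.getD j 0
        = (pvCnt cyc' (adj.getD j []) : Int)) ∧
     pvQInv N cyc' (ws.foldl pvPeelStepA (deg, Q)).2 ∧
     (∀ j : Nat, j < N →
        (j ∈ pvCanonL N (ws.foldl pvPeelStepA (deg, Q)).2 ∨ cyc'.getD j false = false) →
        (ws.foldl pvPeelStepA (deg, Q)).1.getD j 0 ≤ 1) ∧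
     (∀ j : Nat, j < N → cyc'.getD j false = true →
        j ∉ pvCanonL N (ws.foldl pvPeelStepA (deg, Q)).2 →
        (ws.foldl pvPeelStepA (deg, Q)).1.getD j 0 ≠ 1) ∧
     (∀ j : Nat, j < N → cyc'.getD j false = true →
        j ∉ pvCanonL N (ws.foldl pvPeelStepA (deg, Q)).2 →
        (ws.foldl pvPeelStepA (deg, Q)).1.getD j 0 ≤ 0 → adj.getD j [] = []) ∧
     (∀ j : Nat, j < N → S.getD j false = true →
        j ∉ pvCanonL N (ws.foldl pvPeelStepA (deg, Q)).2)) := by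
  intro ws
  induction ws with
  | nil =>
    intro deg Q hwsv hdl hdeg hsb hQ hqle hnot1 halive0 hprot
    refine ⟨hdl, ?_, hQ, hqle, hnot1, halive0, hprot⟩
    intro j hj
    have := hdeg j hj
    simpa [pvMult, pvCnt] using this
  | cons w tl ih =>
    intro deg Q hwsv hdl hdeg hsb hQ hqle hnot1 halive0 hprot
    obtain ⟨wh, hcw, hwhN⟩ := pvIdx_some N w (hwsv w (by simp)).1 (hwsv w (by simp)).2
    have hbrG : PySem.List.pyGetD deg w 0 = deg.getD wh 0 :=
      pvGetD_canon deg w 0 wh (by rw [hdl]; exact hcw)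
    have hbrS : PySem.List.pySetD deg w (PySem.List.pyGetD deg w 0 - 1)
        = deg.set wh (deg.getD wh 0 - 1) := by
      rw [hbrG]; exact pvSetD_canon deg w _ wh (by rw [hdl]; exact hcw)
    set D := deg.getD wh 0 with hD
    rw [hbrG] at hbrS
    have hstep : (w :: tl).foldl pvPeelStepA (deg, Q)
        = tl.foldl pvPeelStepA
            (deg.set wh (D - 1), if D - 1 = 1 then Q ++ [w] else Q) := by
      simp only [List.foldl_cons, pvPeelStepA, hbrG, hbrS]
    rw [hstep]
    have hdl' : (deg.set wh (D - 1)).length = N := by simp [hdl]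
    have hget' : ∀ j : Nat, j < N → (deg.set wh (D - 1)).getD j 0
        = if j = wh then D - 1 else deg.getD j 0 := by
      intro j hj
      exact pvGetD_set deg wh j (D - 1) 0 (by omega)
    have hmw : ∀ j : Nat, pvMult N j (w :: tl)
        = (if j = wh then 1 else 0) + pvMult N j tl := by
      intro j
      rw [pvMult_cons]
      congr 1
      by_cases h : j = wh
      · simp [h, hcw]
      · have hws : ¬ wh = j := fun hh => h hh.symm
        simp [hcw, h, hws]
    -- case split on whether w is enqueued
    by_cases happ : D - 1 = 1
    · -- appended: wh was alive and not yet in the queue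
      have hwhQ : wh ∉ pvCanonL N Q ∧ cyc'.getD wh false = true := by
        constructor
        · intro hmem
          have := hqle wh hwhN (Or.inl hmem)
          omega
        · by_contra hdead
          have := hqle wh hwhN (Or.inr (by simpa using hdead))
          omega
      have hcan' : pvCanonL N (Q ++ [w]) = pvCanonL N Q ++ [wh] :=
        pvCanonL_append_canon N Q w wh hcw
      rw [if_pos happ]
      apply ih (deg.set wh (D - 1)) (Q ++ [w])
        (fun x hx => hwsv x (by simp [hx])) hdl'
      · -- degree accounting
        intro j hj
        rw [hget' j hj]
        have := hdeg j hj
        rw [hmw j] at this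
        by_cases h : j = wh
        · subst h; push_cast at this ⊢; omega
        · simp only [h, if_false] at this ⊢
          push_cast at this ⊢; omega
      · intro j hj
        have := hsb j hj
        rw [hmw j] at this
        split at this <;> omega
      · -- queue invariant
        refine ⟨?_, ?_, ?_⟩
        · intro q hq
          rcases List.mem_append.mp hq with h | h
          · exact hQ.1 q h
          · simp at h; rw [h]; exact ⟨(hwsv w (by simp)).1, (hwsv w (by simp)).2⟩
        · rw [hcan']
          refine List.Nodup.append hQ.2.1 (by simp) ?_
          intro a ha hb
          simp at hb; subst hb
          exact hwhQ.1 ha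
        · intro j hj
          rw [hcan'] at hj
          rcases List.mem_append.mp hj with h | h
          · exact hQ.2.2 j h
          · simp at h; subst h; exact hwhQ.2
      · -- qle
        intro j hj hmem
        rw [hget' j hj]
        by_cases h : j = wh
        · subst h; omega
        · rw [if_neg h]
          apply hqle j hj
          rcases hmem with hm | hm
          · rw [hcan'] at hm
            rcases List.mem_append.mp hm with h2 | h2
            · exact Or.inl h2
            · simp at h2; exact absurd h2 h
          · exact Or.inr hm
      · -- not1
        intro j hj halive hmem
        rw [hcan'] at hmem
        rw [hget' j hj]
        by_cases h : j = wh
        · subst h; exact absurd (by simp) hmem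
        · rw [if_neg h]
          exact hnot1 j hj halive (fun hm => hmem (List.mem_append.mpr (Or.inl hm)))
      · -- alive0
        intro j hj halive hmem hle0
        rw [hcan'] at hmem
        by_cases h : j = wh
        · subst h; exact absurd (by simp) hmem
        · rw [hget' j hj, if_neg h] at hle0
          exact halive0 j hj halive (fun hm => hmem (List.mem_append.mpr (Or.inl hm))) hle0
      · -- protect
        intro j hj hS
        rw [hcan']
        intro hmem
        rcases List.mem_append.mp hmem with h | h
        · exact hprot j hj hS h
        · simp at h; subst h
          -- the appended node cannot be a protected one
          have hdj := hdeg j hj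
          rw [hmw j, if_pos rfl] at hdj
          have hd1 : D - 1 = (pvCnt cyc' (adj.getD j []) : Int) + (pvMult N j tl : Int) := by
            rw [hD]
            push_cast at hdj ⊢
            omega
          rcases hSst j (by omega) hS with hemp | hge2
          · have := hsb j hj
            rw [hmw j, if_pos rfl, hemp] at this
            simp [pvMult] at this
          · have hcle := pvCnt_le S cyc' (by omega) hSle (adj.getD j [])
            omega
    · -- not appended
      rw [if_neg happ]
      apply ih (deg.set wh (D - 1)) Q (fun x hx => hwsv x (by simp [hx])) hdl'
      · intro j hj
        rw [hget' j hj]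
        have := hdeg j hj
        rw [hmw j] at this
        by_cases h : j = wh
        · subst h; push_cast at this ⊢; omega
        · simp only [h, if_false] at this ⊢
          push_cast at this ⊢; omega
      · intro j hj
        have := hsb j hj
        rw [hmw j] at this
        split at this <;> omega
      · exact hQ
      · intro j hj hmem
        rw [hget' j hj]
        by_cases h : j = wh
        · subst h
          have := hqle j hj hmem
          omega
        · rw [if_neg h]; exact hqle j hj hmem
      · intro j hj halive hmem
        rw [hget' j hj]
        by_cases h : j = wh
        · subst h; rw [if_pos rfl]; exact happ
        · rw [if_neg h]; exact hnot1 j hj halive hmem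
      · intro j hj halive hmem hle0
        by_cases h : j = wh
        · subst h
          rw [hget' j hj, if_pos rfl] at hle0
          have hD1 : D ≠ 1 := hnot1 j hj halive hmem
          exact halive0 j hj halive hmem (by omega)
        · rw [hget' j hj, if_neg h] at hle0
          exact halive0 j hj halive hmem hle0
      · exact hprot

theorem pvGetD_true_lt (xs : List Bool) (j : Nat) (h : xs.getD j false = true) :
    j < xs.length := by
  by_contra hj
  rw [List.getD_eq_default _ _ (by omega)] at h
  exact absurd h (by simp)

theorem pvCanonL_cons (N : Nat) (u : Int) (rest : List Int) (uh : Nat)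
    (hu : PySem.List.pyIdx? N u = some uh) :
    pvCanonL N (u :: rest) = uh :: pvCanonL N rest := by
  simp [pvCanonL, hu]

theorem pvPeelInv (N : Nat) (adj : List (List Int)) (S : List Bool)
    (hadjOK : pvAdjOK N adj) (hSlen : S.length = N) (hSst : pvStable adj S) :
    ∀ (fuel : Nat) (Q deg : List Int) (cyc : List Bool),
    cyc.length = N → deg.length = N → cyc.count true ≤ fuel →
    pvQInv N cyc Q →
    (∀ j : Nat, j < N → deg.getD j 0 = (pvCnt cyc (adj.getD j []) : Int)) →
    (∀ j : Nat, j < N → (j ∈ pvCanonL N Q ∨ cyc.getD j false = false) → deg.getD j 0 ≤ 1) →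
    (∀ j : Nat, j < N → cyc.getD j false = true → j ∉ pvCanonL N Q → deg.getD j 0 ≠ 1) →
    (∀ j : Nat, j < N → cyc.getD j false = true → j ∉ pvCanonL N Q → deg.getD j 0 ≤ 0 →
      adj.getD j [] = []) →
    (∀ j : Nat, j < N → S.getD j false = true →
      cyc.getD j false = true ∧ j ∉ pvCanonL N Q) →
    ((pvPeelA adj fuel Q deg cyc).length = N ∧
     pvStable adj (pvPeelA adj fuel Q deg cyc) ∧
     pvLe S (pvPeelA adj fuel Q deg cyc)) := by
  intro fuel
  induction fuel with
  | zero =>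
    intro Q deg cyc hclen hdlen hct hQ hdeg hqle hnot1 halive0 hprot
    have hz : ∀ j : Nat, cyc.getD j false = false := pvCT_zero cyc (by omega)
    simp only [pvPeelA]
    refine ⟨hclen, ?_, ?_⟩
    · intro j hj hc
      rw [hz j] at hc
      exact absurd hc (by simp)
    · intro j hS
      have hjN : j < N := by
        have := pvGetD_true_lt S j hS
        omega
      have := (hprot j hjN hS).1
      rw [hz j] at this
      exact absurd this (by simp)
  | succ f ih =>
    intro Q deg cyc hclen hdlen hct hQ hdeg hqle hnot1 halive0 hprot
    cases Q with
    | nil =>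
      simp only [pvPeelA]
      refine ⟨hclen, ?_, ?_⟩
      · intro j hj hc
        have hjN : j < N := by omega
        have hd := hdeg j hjN
        have h1 : deg.getD j 0 ≠ 1 := hnot1 j hjN hc (by simp [pvCanonL])
        by_cases h0 : pvCnt cyc (adj.getD j []) = 0
        · exact Or.inl (halive0 j hjN hc (by simp [pvCanonL])
            (by rw [hd, h0]; simp))
        · right
          have : pvCnt cyc (adj.getD j []) ≠ 1 := by
            intro hcc; rw [hcc] at hd; simp at hd; exact h1 hd
          omega
      · intro j hS
        have hjN : j < N := by
          have := pvGetD_true_lt S j hS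
          omega
        exact (hprot j hjN hS).1
    | cons u rest =>
      obtain ⟨uh, hcu, huhN⟩ := pvIdx_some N u (hQ.1 u (by simp)).1 (hQ.1 u (by simp)).2
      have hcanQ : pvCanonL N (u :: rest) = uh :: pvCanonL N rest := pvCanonL_cons N u rest uh hcu
      have halu : cyc.getD uh false = true := hQ.2.2 uh (by rw [hcanQ]; simp)
      have hbrC : PySem.List.pySetD cyc u false = cyc.set uh false :=
        pvSetD_canon cyc u false uh (by rw [hclen]; exact hcu)
      have hbrA : PySem.List.pyGetD adj u [] = adj.getD uh [] :=
        pvGetD_canon adj u [] uh (by rw [hadjOK.1]; exact hcu)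
      have hgc : ∀ j : Nat, (cyc.set uh false).getD j false
          = if j = uh then false else cyc.getD j false := by
        intro j
        exact pvGetD_set cyc uh j false false (by omega)
      have hnodup : uh ∉ pvCanonL N rest := by
        have := hQ.2.1
        rw [hcanQ] at this
        exact (List.nodup_cons.mp this).1
      have hSle' : pvLe S (cyc.set uh false) := by
        intro j hS
        have hjN : j < N := by
          have := pvGetD_true_lt S j hS
          omega
        have hp := hprot j hjN hS
        have hju : j ≠ uh := by
          intro hju; subst hju
          exact hp.2 (by rw [hcanQ]; simp)
        rw [hgc j, if_neg hju]
        exact hp.1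
      have hfold := pvFoldInv N adj S (cyc.set uh false) uh hSlen
        (by simp [hclen]) hSle' hSst (adj.getD uh []) deg rest
        (hadjOK.2.1 uh huhN)
        hdlen
        (by
          intro j hj
          have hd := hdeg j hj
          have hsf := pvCnt_set_false cyc uh (by omega) halu (adj.getD j [])
          rw [hclen] at hsf
          have hsym := hadjOK.2.2 uh j huhN hj
          rw [hd]
          push_cast
          omega)
        (by
          intro j hj
          have hsym := hadjOK.2.2 uh j huhN hj
          omega)
        (by
          refine ⟨fun q hq => hQ.1 q (by simp [hq]), ?_, ?_⟩
          · have := hQ.2.1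
            rw [hcanQ] at this
            exact (List.nodup_cons.mp this).2
          · intro j hj
            have hja : cyc.getD j false = true := hQ.2.2 j (by rw [hcanQ]; simp [hj])
            have hju : j ≠ uh := fun hju => hnodup (hju ▸ hj)
            rw [hgc j, if_neg hju]
            exact hja)
        (by
          intro j hj hmem
          apply hqle j hj
          rcases hmem with hm | hm
          · exact Or.inl (by rw [hcanQ]; simp [hm])
          · rw [hgc j] at hm
            by_cases hju : j = uh
            · exact Or.inl (by rw [hcanQ]; simp [hju])
            · rw [if_neg hju] at hm
              exact Or.inr hm)
        (by
          intro j hj halive hmem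
          rw [hgc j] at halive
          by_cases hju : j = uh
          · rw [if_pos hju] at halive
            exact absurd halive (by simp)
          · rw [if_neg hju] at halive
            apply hnot1 j hj halive
            rw [hcanQ]
            simp only [List.mem_cons]
            rintro (h | h)
            · exact hju h
            · exact hmem h)
        (by
          intro j hj halive hmem hle0
          rw [hgc j] at halive
          by_cases hju : j = uh
          · rw [if_pos hju] at halive
            exact absurd halive (by simp)
          · rw [if_neg hju] at halive
            apply halive0 j hj halive _ hle0
            rw [hcanQ]
            simp only [List.mem_cons]
            rintro (h | h)
            · exact hju h
            · exact hmem h)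
        (by
          intro j hj hS
          have := (hprot j hj hS).2
          rw [hcanQ] at this
          intro hm
          exact this (by simp [hm]))
      simp only [pvPeelA]
      rw [hbrC, hbrA]
      obtain ⟨c1, c2, c3, c4, c5, c6, c7⟩ := hfold
      apply ih _ _ _ (by simp [hclen]) c1
        (by
          have := pvCT_set_false cyc uh (by omega) halu
          omega)
        c3 c2 c4 c5 c6
      intro j hj hS
      exact ⟨hSle' j hS, c7 j hj hS⟩

theorem pvIdx_nonneg (N : Nat) (q : Int) (h0 : 0 ≤ q) (h : q < N) :
    PySem.List.pyIdx? N q = some q.toNat := by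
  simp [PySem.List.pyIdx?, h0, h]

-- the leaves loop is a filter
theorem pvLeavesA_eq (n : Int) (deg : List Int) :
    pvLeavesA n deg = (PySem.List.pyRange 0 n 1).filter
      (fun i => decide (PySem.List.pyGetD deg i 0 = 1)) := by
  unfold pvLeavesA
  rw [PySem.List.foldl_append_ite_eq_filter]
  simp

theorem pvDeg0_getD (adj : List (List Int)) (j : Nat) (hj : j < adj.length) :
    (adj.map (fun l => (l.length : Int))).getD j 0 = ((adj.getD j []).length : Int) := by
  rw [List.getD_eq_getElem?_getD, List.getD_eq_getElem?_getD, List.getElem?_map,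
    List.getElem?_eq_getElem hj]
  rfl

theorem pvLeaves_mem (n : Int) (hn : 0 ≤ n) (adj : List (List Int))
    (hlen : adj.length = n.toNat) (j : Nat) :
    (j ∈ pvCanonL n.toNat (pvLeavesA n (adj.map (fun l => (l.length : Int))))
      ↔ (j < n.toNat ∧ (adj.map (fun l => (l.length : Int))).getD j 0 = 1)) := by
  set deg := adj.map (fun l => (l.length : Int)) with hdeg
  have hdlen : deg.length = n.toNat := by simp [hdeg, hlen]
  rw [pvLeavesA_eq]
  constructor
  · intro hmem
    obtain ⟨q, hq, hcq⟩ := List.mem_filterMap.mp hmem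
    obtain ⟨hqr, hq1⟩ := List.mem_filter.mp hq
    obtain ⟨hq0, hqn⟩ := (PySem.List.mem_pyRange_one).mp hqr
    have hqN : q < (n.toNat : Int) := by omega
    rw [pvIdx_nonneg n.toNat q hq0 hqN] at hcq
    have hj : j = q.toNat := by simpa using hcq.symm
    subst hj
    refine ⟨by omega, ?_⟩
    have := pvGetD_canon deg q 0 q.toNat (by rw [hdlen]; exact pvIdx_nonneg _ q hq0 hqN)
    rw [this] at hq1
    simpa using hq1
  · intro ⟨hjN, hj1⟩
    apply List.mem_filterMap.mpr
    refine ⟨(j : Int), ?_, pvIdx_nonneg n.toNat j (by omega) (by exact_mod_cast hjN)⟩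
    apply List.mem_filter.mpr
    constructor
    · exact (PySem.List.mem_pyRange_one).mpr ⟨by omega, by omega⟩
    · rw [PySem.List.pyGetD_natCast]
      simpa using hj1
theorem pvCanonL_nonneg (N : Nat) (Q : List Int)
    (h : ∀ q ∈ Q, PySem.List.pyIdx? N q = some q.toNat) :
    pvCanonL N Q = Q.map Int.toNat := by
  induction Q with
  | nil => rfl
  | cons q qs ih =>
    simp only [pvCanonL, List.filterMap_cons, h q (by simp), List.map_cons]
    rw [← ih (fun x hx => h x (by simp [hx]))]
    rfl

-- the initial invariant of A's peeling loop, and its conclusion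
theorem pvPeelMain (n : Int) (hn : 0 ≤ n) (edges : List (List Int))
    (hOK : pvAdjOK n.toNat (pvBuildB n.toNat edges))
    (S : List Bool) (hSlen : S.length = n.toNat)
    (hSst : pvStable (pvBuildB n.toNat edges) S) :
    ((pvPeelA (pvBuildB n.toNat edges) n.toNat
        (pvLeavesA n ((pvBuildB n.toNat edges).map (fun l => (l.length : Int))))
        ((pvBuildB n.toNat edges).map (fun l => (l.length : Int)))
        (List.replicate n.toNat true)).length = n.toNat ∧
     pvStable (pvBuildB n.toNat edges)
       (pvPeelA (pvBuildB n.toNat edges) n.toNat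
        (pvLeavesA n ((pvBuildB n.toNat edges).map (fun l => (l.length : Int))))
        ((pvBuildB n.toNat edges).map (fun l => (l.length : Int)))
        (List.replicate n.toNat true)) ∧
     pvLe S (pvPeelA (pvBuildB n.toNat edges) n.toNat
        (pvLeavesA n ((pvBuildB n.toNat edges).map (fun l => (l.length : Int))))
        ((pvBuildB n.toNat edges).map (fun l => (l.length : Int)))
        (List.replicate n.toNat true))) := by
  set N := n.toNat with hN
  set adj := pvBuildB N edges with hadj
  set deg0 := adj.map (fun l => (l.length : Int)) with hdeg0
  set Q0 := pvLeavesA n deg0 with hQ0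
  have hNn : ((N : Int)) = n := Int.toNat_of_nonneg hn
  have hmem : ∀ j : Nat, (j ∈ pvCanonL N Q0 ↔ (j < N ∧ deg0.getD j 0 = 1)) := by
    intro j
    exact pvLeaves_mem n hn adj hOK.1 j
  have hd0 : ∀ j : Nat, j < N → deg0.getD j 0 = ((adj.getD j []).length : Int) := by
    intro j hj
    exact pvDeg0_getD adj j (by rw [hOK.1]; exact hj)
  have hcntrep : ∀ j : Nat, j < N →
      pvCnt (List.replicate N true) (adj.getD j []) = (adj.getD j []).length := by
    intro j hj
    exact pvCnt_replicate N (adj.getD j []) (hOK.2.1 j hj)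
  have hrep : ∀ j : Nat, j < N → (List.replicate N true).getD j false = true := by
    intro j hj
    exact List.getD_replicate true hj
  have hQ0mem : ∀ q ∈ Q0, 0 ≤ q ∧ q < n := by
    intro q hq
    rw [hQ0, pvLeavesA_eq] at hq
    exact PySem.List.mem_pyRange_one.mp (List.mem_filter.mp hq).1
  apply pvPeelInv N adj S hOK hSlen hSst N Q0 deg0 (List.replicate N true)
    (by simp) (by simp [hdeg0, hOK.1]) (by simp)
  · refine ⟨?_, ?_, ?_⟩
    · intro q hq
      obtain ⟨h0, h1⟩ := hQ0mem q hq
      exact ⟨by omega, by omega⟩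
    · have hcan : pvCanonL N Q0 = Q0.map Int.toNat := by
        apply pvCanonL_nonneg
        intro q hq
        obtain ⟨h0, h1⟩ := hQ0mem q hq
        exact pvIdx_nonneg N q h0 (by omega)
      rw [hcan]
      have hnd : Q0.Nodup := by
        rw [hQ0, pvLeavesA_eq]
        exact List.Nodup.filter _ (PySem.List.nodup_pyRange_one 0 n)
      apply List.Nodup.map_on _ hnd
      intro x hx y hy hxy
      obtain ⟨hx0, _⟩ := hQ0mem x hx
      obtain ⟨hy0, _⟩ := hQ0mem y hy
      omega
    · intro j hj
      exact hrep j ((hmem j).mp hj).1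
  · intro j hj
    rw [hd0 j hj, hcntrep j hj]
  · intro j hj hm
    rcases hm with hm | hm
    · rw [((hmem j).mp hm).2]
    · rw [hrep j hj] at hm
      exact absurd hm (by simp)
  · intro j hj _ hnm
    intro h1
    exact hnm ((hmem j).mpr ⟨hj, h1⟩)
  · intro j hj _ _ hle0
    rw [hd0 j hj] at hle0
    have : (adj.getD j []).length = 0 := by omega
    exact List.eq_nil_of_length_eq_zero this
  · intro j hj hS
    refine ⟨hrep j hj, ?_⟩
    intro hm
    have h1 := ((hmem j).mp hm).2
    rw [hd0 j hj] at h1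
    have hlerep : pvLe S (List.replicate N true) := by
      intro i hSi
      have : i < N := by
        have := pvGetD_true_lt S i hSi
        omega
      exact hrep i this
    rcases hSst j (by omega) hS with hemp | hge2
    · rw [hemp] at h1
      simp at h1
    · have := pvCnt_le S (List.replicate N true) (by simp [hSlen]) hlerep (adj.getD j [])
      rw [hcntrep j hj] at this
      omega

theorem pvBoolExt (a b : List Bool) (hlen : a.length = b.length)
    (h1 : pvLe a b) (h2 : pvLe b a) : a = b := by
  apply List.ext_getElem hlen
  intro j hj1 hj2
  have ga : a.getD j false = a[j] := by
    rw [List.getD_eq_getElem?_getD, List.getElem?_eq_getElem hj1]; rfl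
  have gb : b.getD j false = b[j] := by
    rw [List.getD_eq_getElem?_getD, List.getElem?_eq_getElem hj2]; rfl
  cases ha : a[j] with
  | true =>
    have := h1 j (by rw [ga, ha])
    rw [gb] at this
    rw [this]
  | false =>
    cases hb : b[j] with
    | false => rfl
    | true =>
      have := h2 j (by rw [gb, hb])
      rw [ga, ha] at this
      exact absurd this (by simp)

-- A's peeling and B's bulk-filtering fixpoint compute the same in-cycle flags
theorem pvCoreEq (n : Int) (hn : 0 ≤ n) (edges : List (List Int))
    (hOK : pvAdjOK n.toNat (pvBuildB n.toNat edges)) :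
    pvPeelA (pvBuildB n.toNat edges) n.toNat
        (pvLeavesA n ((pvBuildB n.toNat edges).map (fun l => (l.length : Int))))
        ((pvBuildB n.toNat edges).map (fun l => (l.length : Int)))
        (List.replicate n.toNat true)
      = pvCoreIter (pvBuildB n.toNat edges) n n.toNat (List.replicate n.toNat true) := by
  have hL := pvCoreIter_ok (pvBuildB n.toNat edges) n n.toNat
    (List.replicate n.toNat true) (by simp) (by simp)
  have hT := pvPeelMain n hn edges hOK
    (pvCoreIter (pvBuildB n.toNat edges) n n.toNat (List.replicate n.toNat true))
    hL.1 hL.2.1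
  apply pvBoolExt _ _ (by rw [hT.1, hL.1]) _ hT.2.2
  apply hL.2.2 _ hT.1 hT.2.1
  intro j hj
  have : j < n.toNat := by
    have := pvGetD_true_lt _ j hj
    rw [hT.1] at this
    exact this
  exact List.getD_replicate true this

-- pySetD commutes with map (used with f = length to read degrees off adjacency lists)
theorem pvPySetD_map {α β : Type} (f : α → β) (xs : List α) (i : Int) (v : α) :
    (PySem.List.pySetD xs i v).map f = PySem.List.pySetD (xs.map f) i (f v) := by
  simp only [PySem.List.pySetD, PySem.List.pySet?]
  cases h : PySem.List.pyIdx? xs.length i with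
  | none => simp [h]
  | some k => simp [h, List.map_set]

-- appending one element to cell i bumps the length stored at cell i
theorem pvAppendCell_len (adj : List (List Int)) (i x : Int) :
    (PySem.List.pySetD adj i (PySem.List.pyGetD adj i [] ++ [x])).map
        (fun l => (l.length : Int))
      = PySem.List.pySetD (adj.map fun l => (l.length : Int)) i
          (PySem.List.pyGetD (adj.map fun l => (l.length : Int)) i 0 + 1) := by
  have h := PySem.List.pyGetD_map (fun l : List Int => (l.length : Int)) adj i []
  simp only [List.length_nil, Nat.cast_zero] at h
  rw [pvPySetD_map, h]
  simp

-- building: A's (adjacency, degree) fold = B's adjacency fold paired with its lengths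
theorem pvBuild (edges : List (List Int)) : ∀ (adj : List (List Int)),
    edges.foldl (fun (s : List (List Int) × List Int) e =>
      let u := PySem.List.pyGetD e 0 0
      let v := PySem.List.pyGetD e 1 0
      let adj1 := PySem.List.pySetD s.1 u (PySem.List.pyGetD s.1 u [] ++ [v])
      let adj2 := PySem.List.pySetD adj1 v (PySem.List.pyGetD adj1 v [] ++ [u])
      let deg1 := PySem.List.pySetD s.2 u (PySem.List.pyGetD s.2 u 0 + 1)
      let deg2 := PySem.List.pySetD deg1 v (PySem.List.pyGetD deg1 v 0 + 1)
      (adj2, deg2)) (adj, adj.map fun l => (l.length : Int))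
    = (edges.foldl (fun adj e =>
        [(PySem.List.pyGetD e 0 0, PySem.List.pyGetD e 1 0),
         (PySem.List.pyGetD e 1 0, PySem.List.pyGetD e 0 0)].foldl
          (fun adj (p : Int × Int) =>
            PySem.List.pySetD adj p.1 (PySem.List.pyGetD adj p.1 [] ++ [p.2])) adj) adj,
       (edges.foldl (fun adj e =>
        [(PySem.List.pyGetD e 0 0, PySem.List.pyGetD e 1 0),
         (PySem.List.pyGetD e 1 0, PySem.List.pyGetD e 0 0)].foldl
          (fun adj (p : Int × Int) =>
            PySem.List.pySetD adj p.1 (PySem.List.pyGetD adj p.1 [] ++ [p.2])) adj) adj).map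
         fun l => (l.length : Int)) := by
  induction edges with
  | nil => intro adj; rfl
  | cons e es ih =>
    intro adj
    simp only [List.foldl_cons, List.foldl_nil]
    rw [← pvAppendCell_len adj (PySem.List.pyGetD e 0 0) (PySem.List.pyGetD e 1 0),
        ← pvAppendCell_len _ (PySem.List.pyGetD e 1 0) (PySem.List.pyGetD e 0 0)]
    exact ih _

theorem pvBuildA_eq (N : Nat) (edges : List (List Int)) :
    pvBuildA N edges = (pvBuildB N edges, (pvBuildB N edges).map fun l => (l.length : Int)) := by
  unfold pvBuildA pvBuildB
  rw [show List.replicate N (0 : Int)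
        = (List.replicate N ([] : List Int)).map (fun l => (l.length : Int)) by simp]
  exact pvBuild edges _

-- the BFS inner loops mark the same cells and enqueue the same nodes, B tagging them d + 1
theorem pvBfsFold (d : Int) (nbrs : List Int) : ∀ (vis : List Bool) (accA : List Int)
    (accB : List (Int × Int)),
    (nbrs.foldl (pvBfsStepB d) (vis, accB)).1 = (nbrs.foldl pvBfsStepA (vis, accA)).1 ∧
    ∃ δ : List Int, (nbrs.foldl pvBfsStepA (vis, accA)).2 = accA ++ δ ∧
      (nbrs.foldl (pvBfsStepB d) (vis, accB)).2 = accB ++ δ.map (fun v => (v, d + 1)) := by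
  induction nbrs with
  | nil => intro vis accA accB; exact ⟨rfl, [], by simp, by simp⟩
  | cons w ws ih =>
    intro vis accA accB
    by_cases hw : PySem.List.pyGetD vis w false
    · simpa only [List.foldl_cons, pvBfsStepA, pvBfsStepB, hw, if_pos] using ih vis accA accB
    · simp only [List.foldl_cons, pvBfsStepA, pvBfsStepB, hw, Bool.false_eq_true, if_neg,
        not_false_eq_true]
      obtain ⟨h1, δ, h2, h3⟩ :=
        ih (PySem.List.pySetD vis w true) (accA ++ [w]) (accB ++ [(w, d + 1)])
      exact ⟨h1, w :: δ, by rw [h2]; simp, by rw [h3]; simp⟩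

-- lockstep: A's level-counting BFS = B's (node, distance)-queue BFS; k pops of the current
-- level (at distance d) remain, everything behind them is already at distance d + 1
theorem pvBfsLock (adj : List (List Int)) (f : Nat) : ∀ (q : List Int) (k : Nat) (d : Int)
    (vis : List Bool) (dist : List Int), k ≤ q.length →
    pvBfsA adj f k d q vis dist
      = pvBfsB adj f ((q.take k).map (fun u => (u, d)) ++ (q.drop k).map (fun u => (u, d + 1)))
          vis dist := by
  induction f with
  | zero => intro q k d vis dist _; rfl
  | succ f ih =>
    intro q k d vis dist hk
    cases q with
    | nil => simp [pvBfsA, pvBfsB]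
    | cons u rest =>
      cases k with
      | zero =>
        simp only [List.take_zero, List.map_nil, List.nil_append, List.drop_zero, List.map_cons]
        show pvBfsA adj (f + 1) 0 d (u :: rest) vis dist = _
        simp only [pvBfsA, pvBfsB]
        obtain ⟨h1, δ, h2, h3⟩ := pvBfsFold (d + 1) (PySem.List.pyGetD adj u [])
          vis rest (rest.map (fun u => (u, d + 1)))
        rw [h2, h3, h1]
        simp only [if_true, List.length_cons, Nat.add_sub_cancel]
        rw [ih (rest ++ δ) rest.length (d + 1) _ _ (by simp)]
        rw [List.take_left, List.drop_left]
      | succ k0 =>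
        have hk0 : k0 ≤ rest.length := by simpa using hk
        simp only [List.take_succ_cons, List.drop_succ_cons, List.map_cons, List.cons_append]
        show pvBfsA adj (f + 1) (k0 + 1) d (u :: rest) vis dist = _
        simp only [pvBfsA, pvBfsB]
        obtain ⟨h1, δ, h2, h3⟩ := pvBfsFold d (PySem.List.pyGetD adj u [])
          vis rest ((rest.take k0).map (fun u => (u, d)) ++ (rest.drop k0).map (fun u => (u, d + 1)))
        rw [h2, h3, h1]
        simp only [Nat.succ_ne_zero, if_false, Nat.add_sub_cancel]
        rw [ih (rest ++ δ) k0 d _ _ (by simp; omega)]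
        rw [List.take_append_of_le_length hk0, List.drop_append_of_le_length hk0,
          List.map_append, List.append_assoc]

-- A's seeding loop returns the in-cycle nodes in order and rebuilds exactly the cyc flags
theorem pvSeed (cyc : List Bool) (n : Int) (hn : (cyc.length : Int) = n) :
    ∀ (k : Nat) (q : List Int) (vis : List Bool), 0 ≤ n - (k : Int) →
    vis.length = cyc.length →
    (∀ j : Nat, j < cyc.length →
      vis.getD j false = (decide ((j : Int) < n - (k : Int)) && cyc.getD j false)) →
    (PySem.List.pyRange (n - (k : Int)) n 1).foldl (pvSeedStep cyc) (q, vis)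
      = (q ++ (PySem.List.pyRange (n - (k : Int)) n 1).filter
            (fun i => PySem.List.pyGetD cyc i false), cyc) := by
  intro k
  induction k with
  | zero =>
    intro q vis _ hlen hinv
    have hnil : PySem.List.pyRange (n - (0 : Nat)) n 1 = [] :=
      PySem.List.pyRange_one_eq_nil (by omega)
    rw [hnil]
    simp only [List.foldl_nil, List.filter_nil, List.append_nil]
    have hv : vis = cyc := by
      apply List.ext_getElem (by omega)
      intro j hj1 hj2
      have h := hinv j hj2
      have hjlt : ((j : Int) < n) := by omega
      norm_num at h
      simp only [List.getElem?_eq_getElem hj1,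
        List.getElem?_eq_getElem hj2, Option.getD_some] at h
      simpa [hjlt] using h
    rw [hv]
  | succ k ihk =>
    intro q vis h0 hlen hinv
    have hcast : ((k + 1 : Nat) : Int) = (k : Int) + 1 := by push_cast; ring
    rw [hcast] at h0 ⊢
    simp only [hcast] at hinv
    have hcons : PySem.List.pyRange (n - ((k : Int) + 1)) n 1
        = (n - ((k : Int) + 1)) :: PySem.List.pyRange (n - (k : Int)) n 1 := by
      rw [PySem.List.pyRange_one_cons (by omega : n - ((k : Int) + 1) < n),
        show n - ((k : Int) + 1) + 1 = n - (k : Int) by ring]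
    set a : Int := n - ((k : Int) + 1) with ha
    have ha0 : 0 ≤ a := h0
    have halt : a < (cyc.length : Int) := by omega
    have hget : PySem.List.pyGetD cyc a false = cyc[a.toNat]'(by omega) :=
      PySem.List.pyGetD_eq_getElem cyc false ha0 halt
    rw [hcons]
    simp only [List.foldl_cons, List.filter_cons]
    have hstep : pvSeedStep cyc (q, vis) a
        = (if PySem.List.pyGetD cyc a false then q ++ [a] else q,
           if PySem.List.pyGetD cyc a false then PySem.List.pySetD vis a true else vis) := by
      unfold pvSeedStep; split <;> simp_all
    rw [hstep]
    have hinv' : ∀ j : Nat, j < cyc.length →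
        (if PySem.List.pyGetD cyc a false then PySem.List.pySetD vis a true else vis).getD j false
          = (decide ((j : Int) < n - (k : Int)) && cyc.getD j false) := by
      intro j hj
      have hbase := hinv j hj
      by_cases hc : PySem.List.pyGetD cyc a false
      · rw [if_pos hc, PySem.List.pySetD_of_nonneg _ _ ha0]
        rw [List.getD_eq_getElem?_getD, List.getElem?_set]
        by_cases hja : a.toNat = j
        · subst hja
          rw [hget] at hc
          have hlt2 : ((a.toNat : Int) < n - (k : Int)) := by omega
          have hcy : cyc.getD a.toNat false = true := by
            rw [List.getD_eq_getElem?_getD, List.getElem?_eq_getElem hj, Option.getD_some]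
            exact hc
          have hx1 : a < n - (k : Int) := by omega
          have hx2 : ((k : Int) < n) := by omega
          simp [hlt2, hcy, hx1, hx2, (by omega : a.toNat < vis.length),
            ← List.getD_eq_getElem?_getD]
        · rw [if_neg hja, ← List.getD_eq_getElem?_getD, hbase]
          have hiffj : ((j : Int) < a) ↔ ((j : Int) < n - (k : Int)) := by omega
          simp [hiffj]
      · rw [if_neg hc, hbase]
        by_cases hja : a.toNat = j
        · subst hja
          rw [hget] at hc
          have hcy : cyc.getD a.toNat false = false := by
            rw [List.getD_eq_getElem?_getD, List.getElem?_eq_getElem hj, Option.getD_some]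
            simpa using hc
          simp [hcy, ← List.getD_eq_getElem?_getD]
        · have hiffj : ((j : Int) < a) ↔ ((j : Int) < n - (k : Int)) := by omega
          simp [hiffj]
    have hlen' : (if PySem.List.pyGetD cyc a false then PySem.List.pySetD vis a true
        else vis).length = cyc.length := by
      split <;> simp [PySem.List.length_pySetD, hlen]
    rw [ihk _ _ (by omega) hlen' hinv']
    by_cases hc : PySem.List.pyGetD cyc a false <;> simp [hc]

theorem pvMain (n : Int) (edges : List (List Int)) (hPre : Pre_distanceToCycle n edges) :
    distanceToCycle n edges = distanceToCycle_alt n edges := by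
  obtain ⟨hor, hall⟩ := hPre
  show pvBfsA (pvBuildA n.toNat edges).1 n.toNat 0 (-1)
      (pvSeedA n n.toNat (pvPeelA (pvBuildA n.toNat edges).1 n.toNat
        (pvLeavesA n (pvBuildA n.toNat edges).2) (pvBuildA n.toNat edges).2
        (List.replicate n.toNat true))).1
      (pvSeedA n n.toNat (pvPeelA (pvBuildA n.toNat edges).1 n.toNat
        (pvLeavesA n (pvBuildA n.toNat edges).2) (pvBuildA n.toNat edges).2
        (List.replicate n.toNat true))).2
      (List.replicate n.toNat 0)
    = pvBfsB (pvBuildB n.toNat edges) n.toNat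
        (((PySem.List.pyRange 0 n 1).filter (fun i =>
            PySem.List.pyGetD
              (pvCoreIter (pvBuildB n.toNat edges) n n.toNat (List.replicate n.toNat true))
              i false)).map (fun i => (i, (0 : Int))))
        (pvCoreIter (pvBuildB n.toNat edges) n n.toNat (List.replicate n.toNat true))
        (List.replicate n.toNat 0)
  by_cases hn : 0 ≤ n
  · have hOK := pvBuildB_ok n hn edges hall
    rw [pvBuildA_eq]
    dsimp only
    rw [pvCoreEq n hn edges hOK]
    set N := n.toNat with hN
    set adj := pvBuildB N edges with hadj
    set L := pvCoreIter adj n N (List.replicate N true) with hL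
    have hLfacts := pvCoreIter_ok adj n N (List.replicate N true) (by simp [hN]) (by simp)
    have hcyclen : L.length = N := hLfacts.1
    have hNn : (N : Int) = n := Int.toNat_of_nonneg hn
    have h0 : n - (N : Int) = 0 := by omega
    have hs := pvSeed L n (by rw [hcyclen, hNn]) N [] (List.replicate N false)
      (by omega) (by simp [hcyclen])
      (by intro j hj
          rw [List.getD_replicate false (show j < N by omega)]
          have hj0 : ¬ ((j : Int) < n - (N : Int)) := by omega
          simp [hj0])
    rw [h0] at hs
    have hseed : pvSeedA n N L
        = ((PySem.List.pyRange 0 n 1).filter (fun i => PySem.List.pyGetD L i false), L) := by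
      unfold pvSeedA; rw [hs]; simp
    rw [hseed]
    dsimp only
    rw [pvBfsLock adj N _ 0 (-1) L (List.replicate N 0) (Nat.zero_le _)]
    simp
  · -- n < 0: Python builds only empty arrays; both sides return []
    have hedges : edges = [] := by
      rcases hor with h | h
      · exact absurd h hn
      · exact h
    subst hedges
    have hN0 : n.toNat = 0 := by omega
    have hr : PySem.List.pyRange 0 n 1 = [] := PySem.List.pyRange_one_eq_nil (by omega)
    rw [hN0, hr]
    simp [pvBuildA_eq, pvBfsA, pvBfsB, pvPeelA, pvCoreIter, pvSeedA, pvLeavesA]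

-- ===== VERDICT (by name: the statement is the Claim_ definition above) =====
theorem distanceToCycle_spec : Claim_equal_distanceToCycle := by
  intro n edges _ hPre
  unfold Spec_distanceToCycle
  exact pvMain n edges hPre
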